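-- pv_equiv track=rewrite | github.com/MyBlog-Webtech-N2/myBlog | blog/models.py | determine_average_image
-- ===== SOURCE A (Python) =====
-- def determine_average_image(average):
--     images = [
--         {'threshold': 4, 'image': 'very-cool.png'},
--         {'threshold': 3, 'image': 'cool.png'},
--         {'threshold': 2, 'image': 'good.png'},
--         {'threshold': 1, 'image': 'not-bad.png'},
--         {'threshold': 0, 'image': 'bad.png'}
--     ]
--
--     for img in images:
--         if average >= img['threshold']:
--             return img['image']
--
--     return 'bad.png'
-- ===== SOURCE B (Python) =====
-- def determine_average_image(average):
--     names = ['bad', 'not-bad', 'good', 'cool', 'very-cool']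
--     count = sum(average >= t for t in range(5))
--     return names[max(count - 1, 0)] + '.png'
-- ===== Notes on version B (the rewrite author's own statement) =====
-- stated objective: alternative
-- what changed: Replaces the first-match scan over a high-to-low list of threshold dicts by counting how many thresholds the average meets and indexing into a flat name list.
import Mathlib
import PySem

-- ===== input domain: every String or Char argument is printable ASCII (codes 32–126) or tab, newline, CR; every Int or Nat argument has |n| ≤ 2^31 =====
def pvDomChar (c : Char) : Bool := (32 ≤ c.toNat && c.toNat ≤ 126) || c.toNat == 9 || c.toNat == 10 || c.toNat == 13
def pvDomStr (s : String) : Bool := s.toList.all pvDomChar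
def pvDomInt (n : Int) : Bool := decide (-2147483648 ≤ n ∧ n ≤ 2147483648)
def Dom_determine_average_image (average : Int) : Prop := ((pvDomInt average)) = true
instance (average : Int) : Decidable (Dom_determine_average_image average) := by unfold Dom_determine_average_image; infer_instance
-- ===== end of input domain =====

-- B replaces A's first-match scan over a high-to-low threshold list by counting met thresholds
-- and indexing a flat name list (objective: alternative decomposition, same cost).

-- ===== PORT A =====
-- A's loop over the dict list: recursion over (threshold, image) pairs, first match wins.
def detAImages : List (Int × String) :=
  [(4, "very-cool.png"), (3, "cool.png"), (2, "good.png"), (1, "not-bad.png"), (0, "bad.png")]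

def detALoop (average : Int) : List (Int × String) → String
  | [] => "bad.png"
  | img :: rest => if average ≥ img.1 then img.2 else detALoop average rest

def determine_average_image (average : Int) : String :=
  detALoop average detAImages

-- ===== PORT B =====
def determine_average_image_alt (average : Int) : String :=
  let names : List String := ["bad", "not-bad", "good", "cool", "very-cool"]
  let count : Int :=
    (PySem.List.pyRange 0 5 1).foldl (fun acc t => acc + (if average ≥ t then 1 else 0)) 0
  -- names[max(count-1, 0)]: index is always in range 0..4, so pyGet? is some
  ((PySem.List.pyGet? names (max (count - 1) 0)).getD "") ++ ".png"

-- ===== PRECONDITION & SPEC =====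
def Spec_determine_average_image (average : Int) (out : String) : Prop := out = determine_average_image_alt average
instance (average : Int) (out : String) : Decidable (Spec_determine_average_image average out) := by unfold Spec_determine_average_image; infer_instance

-- ===== CLAIM (what is proved, stated in full; the proofs are below) =====
def Claim_equal_determine_average_image : Prop := ∀ (average : Int), Dom_determine_average_image average → Spec_determine_average_image average (determine_average_image average)

-- ===== LEMMAS AND PROOFS =====
theorem det_eq (average : Int) :
    determine_average_image average = determine_average_image_alt average := by
  simp only [determine_average_image, determine_average_image_alt, detAImages, detALoop]
  rw [show PySem.List.pyRange 0 5 1 = [0, 1, 2, 3, 4] from by decide]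
  simp only [List.foldl]
  split_ifs <;> first | rfl | (exfalso; omega)

-- ===== VERDICT (by name: the statement is the Claim_ definition above) =====
theorem determine_average_image_spec : Claim_equal_determine_average_image := by
  intro a _; exact det_eq a
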